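-- pv_equiv track=rewrite | github.com/wyk18703232953/myResearch | codeComplex/data/filteredData/python/np/python_np_0410.py | solve
-- ===== SOURCE A (Python) =====
-- def bisearch_max(mn, mx, func):
--     ok = mn
--     ng = mx
--     while ok + 1 < ng:
--         mid = (ok + ng) // 2
--         if func(mid):
--             ok = mid
--         else:
--             ng = mid
--     return ok
--
-- def check_factory(A):
--     N = len(A)
--     if N == 0:
--         return lambda m: False
--     M = len(A[0]) if A[0] else 0
--
--     def check(m):
--         ok = [0] * N
--         S = set()
--         for i in range(N):
--             row_mask = 0
--             for j in range(M):
--                 if A[i][j] >= m: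
--                     row_mask |= 1 << j
--             ok[i] = row_mask
--             S.add(row_mask)
--         full = (1 << M) - 1
--         for bit1 in range(1 << M):
--             if bit1 not in S:
--                 continue
--             for bit2 in range(bit1, 1 << M):
--                 if bit2 in S and (bit1 | bit2) == full:
--                     return True
--         return False
--
--     return check
--
-- def solve(A):
--     N = len(A)
--     if N == 0:
--         return -1, -1
--     M = len(A[0]) if A[0] else 0
--     check = check_factory(A)
--     res = bisearch_max(0, 10**9 + 1, check)
--     ok = [0] * N
--     S = set()
--     D = {}
--     for i in range(N):
--         row_mask = 0
--         for j in range(M):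
--             if A[i][j] >= res:
--                 row_mask |= 1 << j
--         ok[i] = row_mask
--         S.add(row_mask)
--         D[row_mask] = i + 1
--     full = (1 << M) - 1
--     ans1, ans2 = -1, -1
--     for bit1 in range(1 << M):
--         if bit1 not in S:
--             continue
--         for bit2 in range(bit1, 1 << M):
--             if bit2 in S and (bit1 | bit2) == full:
--                 ans1, ans2 = D[bit1], D[bit2]
--                 return ans1, ans2
--     return ans1, ans2
-- ===== SOURCE B (Python) =====
-- def bisearch_max(mn, mx, func):
--     # recursive decomposition of the same binary search
--     if mn + 1 >= mx:
--         return mn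
--     mid = (mn + mx) // 2
--     return bisearch_max(mid, mx, func) if func(mid) else bisearch_max(mn, mid, func)
--
--
-- def _masks(A, M, m):
--     # dict mask -> 1-based index of the last row with that mask
--     D = {}
--     for i, row in enumerate(A):
--         rm = 0
--         for j, v in enumerate(row[:M]):
--             if v >= m:
--                 rm |= 1 << j
--         D[rm] = i + 1
--     return D
--
--
-- def _first_pair(D, full):
--     # scan only the distinct masks, in increasing numeric order:
--     # the first covering pair found here is exactly the first one in
--     # the full 0..2^M x 0..2^M lexicographic scan.
--     S = sorted(D)
--     for i, s1 in enumerate(S):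
--         for s2 in S[i:]:
--             if s1 | s2 == full:
--                 return s1, s2
--     return None
--
--
-- def solve(A):
--     if not A:
--         return -1, -1
--     M = len(A[0])
--     full = (1 << M) - 1
--     res = bisearch_max(0, 10 ** 9 + 1,
--                        lambda m: _first_pair(_masks(A, M, m), full) is not None)
--     D = _masks(A, M, res)
--     pair = _first_pair(D, full)
--     if pair is None:
--         return -1, -1
--     s1, s2 = pair
--     return D[s1], D[s2]
-- ===== Notes on version B (the rewrite author's own statement) =====
-- stated objective: faster
-- what changed: The pair-coverage test now scans only the distinct row masks in increasing order (sorted dict keys) instead of all 2^M x 2^M mask pairs, and the binary search is written recursively; the mask dict is built in one enumerate pass.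
import Mathlib
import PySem

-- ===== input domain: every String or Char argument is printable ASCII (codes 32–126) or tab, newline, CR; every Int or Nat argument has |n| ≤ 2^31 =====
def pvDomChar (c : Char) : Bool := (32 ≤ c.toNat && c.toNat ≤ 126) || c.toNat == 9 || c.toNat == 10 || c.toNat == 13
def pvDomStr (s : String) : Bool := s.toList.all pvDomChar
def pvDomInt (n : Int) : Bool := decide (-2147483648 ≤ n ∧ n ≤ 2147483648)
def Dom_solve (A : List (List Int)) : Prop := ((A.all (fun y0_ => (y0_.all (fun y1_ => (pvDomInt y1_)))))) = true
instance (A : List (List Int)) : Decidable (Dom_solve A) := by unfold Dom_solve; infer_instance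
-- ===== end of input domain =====

-- B replaces A's O(4^M) scan over all mask pairs by a scan over the distinct row masks
-- in increasing order (sorted dict keys); return values proved equal on Pre_solve.

-- ===== PORT A =====

-- bisearch_max: the while loop, iteration count bounded by the structural fuel ng - ok
-- (the gap shrinks every iteration, so the fuel is never exhausted; exit returns ok)
def bisearchGoA : Nat → Int → Int → (Int → Bool) → Int
  | 0, ok, _, _ => ok
  | fuel + 1, ok, ng, f =>
    if ok + 1 < ng then
      if f (PySem.Int.floordiv (ok + ng) 2) then
        bisearchGoA fuel (PySem.Int.floordiv (ok + ng) 2) ng f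
      else bisearchGoA fuel ok (PySem.Int.floordiv (ok + ng) 2) f
    else ok

def bisearchMaxA (ok ng : Int) (f : Int → Bool) : Int :=
  bisearchGoA (ng - ok).toNat ok ng f

-- inner loop: for j in range(M): if A[i][j] >= m: row_mask |= 1 << j
-- (masks are nonnegative Python ints, carried as Nat; `1 << j` = `1 <<< j.toNat`, exact since j ≥ 0)
def rowMaskA (row : List Int) (M : Nat) (m : Int) : Nat :=
  (PySem.List.pyRange 0 (M : Int) 1).foldl
    (fun rm j => if PySem.List.pyGetD row j 0 ≥ m then rm ||| (1 <<< j.toNat) else rm) 0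

-- the S-building loop of check (the dead list `ok` is not carried)
def buildS_A (A : List (List Int)) (M : Nat) (m : Int) : PySem.Set Nat :=
  (PySem.List.pyRange 0 (A.length : Int) 1).foldl
    (fun S i => PySem.Set.add S (rowMaskA (PySem.List.pyGetD A i []) M m)) PySem.Set.empty

-- the double loop of check with early `return True` = any-of-any;
-- range(bit1, 1 << M) = List.range' bit1 (1 <<< M - bit1)
def checkA (A : List (List Int)) (M : Nat) (m : Int) : Bool :=
  (List.range (1 <<< M)).any (fun b1 => decide (b1 ∈ buildS_A A M m) &&
    (List.range' b1 (1 <<< M - b1)).any (fun b2 =>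
      decide (b2 ∈ buildS_A A M m) && ((b1 ||| b2) == (1 <<< M) - 1)))

def checkFactoryA (A : List (List Int)) : Int → Bool :=
  if A.length = 0 then fun _ => false else fun m => checkA A A.headI.length m

-- the S/D-building loop of solve (two independent accumulators; dead `ok` not carried)
def buildSD_A (A : List (List Int)) (M : Nat) (m : Int) : PySem.Set Nat × PySem.Dict Nat Int :=
  (PySem.List.pyRange 0 (A.length : Int) 1).foldl
    (fun sd i =>
      (PySem.Set.add sd.1 (rowMaskA (PySem.List.pyGetD A i []) M m),
       PySem.Dict.insert sd.2 (rowMaskA (PySem.List.pyGetD A i []) M m) (i + 1)))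
    (PySem.Set.empty, PySem.Dict.empty)

-- the final double loop with early `return D[bit1], D[bit2]`: the pair as an Option
def pairScanA (S : PySem.Set Nat) (n full : Nat) : List Nat → Option (Nat × Nat)
  | [] => none
  | b1 :: rest =>
    if b1 ∈ S then
      match (List.range' b1 (n - b1)).find? (fun b2 => decide (b2 ∈ S) && ((b1 ||| b2) == full)) with
      | some b2 => some (b1, b2)
      | none => pairScanA S n full rest
    else pairScanA S n full rest

def solve (A : List (List Int)) : Int × Int :=
  if A.length = 0 then (-1, -1)
  else
    match pairScanA (buildSD_A A A.headI.length (bisearchMaxA 0 (10 ^ 9 + 1) (checkFactoryA A))).1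
        (1 <<< A.headI.length) ((1 <<< A.headI.length) - 1) (List.range (1 <<< A.headI.length)) with
    | some (b1, b2) =>
        ((buildSD_A A A.headI.length (bisearchMaxA 0 (10 ^ 9 + 1) (checkFactoryA A))).2.getD b1 0,
         (buildSD_A A A.headI.length (bisearchMaxA 0 (10 ^ 9 + 1) (checkFactoryA A))).2.getD b2 0)
    | none => (-1, -1)

-- ===== PORT B =====

-- recursive bisearch_max of Source B (recursion depth bounded by the structural fuel mx - mn)
def bisearchGoB : Nat → Int → Int → (Int → Bool) → Int
  | 0, mn, _, _ => mn
  | fuel + 1, mn, mx, f =>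
    if mn + 1 ≥ mx then mn
    else
      if f (PySem.Int.floordiv (mn + mx) 2) then
        bisearchGoB fuel (PySem.Int.floordiv (mn + mx) 2) mx f
      else bisearchGoB fuel mn (PySem.Int.floordiv (mn + mx) 2) f

def bisearchMaxB (mn mx : Int) (f : Int → Bool) : Int :=
  bisearchGoB (mx - mn).toNat mn mx f

-- for j, v in enumerate(row[:M]): if v >= m: rm |= 1 << j    (row[:M] = take M, M ≥ 0)
def rowMaskB (row : List Int) (M : Nat) (m : Int) : Nat :=
  (PySem.List.enumerate (row.take M)).foldl
    (fun rm jv => if jv.2 ≥ m then rm ||| (1 <<< jv.1.toNat) else rm) 0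

-- _masks: dict row-mask -> last 1-based row index
def masksB (A : List (List Int)) (M : Nat) (m : Int) : PySem.Dict Nat Int :=
  (PySem.List.enumerate A).foldl
    (fun D p => PySem.Dict.insert D (rowMaskB p.2 M m) (p.1 + 1)) PySem.Dict.empty

-- _first_pair's loops: for i, s1 in enumerate(S): for s2 in S[i:] — S[i:] is the current suffix
def firstPairGo (full : Nat) : List Nat → Option (Nat × Nat)
  | [] => none
  | s1 :: rest =>
    match (s1 :: rest).find? (fun s2 => (s1 ||| s2) == full) with
    | some s2 => some (s1, s2)
    | none => firstPairGo full rest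

def firstPairB (D : PySem.Dict Nat Int) (full : Nat) : Option (Nat × Nat) :=
  firstPairGo full (PySem.List.sorted D.keys (fun x => x) false)

def solve_alt (A : List (List Int)) : Int × Int :=
  if A.length = 0 then (-1, -1)
  else
    match firstPairB
        (masksB A A.headI.length
          (bisearchMaxB 0 (10 ^ 9 + 1)
            (fun m => (firstPairB (masksB A A.headI.length m) ((1 <<< A.headI.length) - 1)).isSome)))
        ((1 <<< A.headI.length) - 1) with
    | some (s1, s2) =>
        ((masksB A A.headI.length
            (bisearchMaxB 0 (10 ^ 9 + 1)
              (fun m => (firstPairB (masksB A A.headI.length m) ((1 <<< A.headI.length) - 1)).isSome))).getD s1 0,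
         (masksB A A.headI.length
            (bisearchMaxB 0 (10 ^ 9 + 1)
              (fun m => (firstPairB (masksB A A.headI.length m) ((1 <<< A.headI.length) - 1)).isSome))).getD s2 0)
    | none => (-1, -1)

-- ===== PRECONDITION & SPEC =====
-- Pre_ excludes ragged matrices whose later rows are shorter than the first row:
-- there Python A raises IndexError on A[i][j].
def Pre_solve (A : List (List Int)) : Prop := ∀ row ∈ A, A.headI.length ≤ row.length
instance (A : List (List Int)) : Decidable (Pre_solve A) := by unfold Pre_solve; infer_instance

def pvWitness_solve : List (List Int) := [[1, 2], [3, 0]]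

def Spec_solve (A : List (List Int)) (out : Int × Int) : Prop := out = solve_alt A
instance (A : List (List Int)) (out : Int × Int) : Decidable (Spec_solve A out) := by unfold Spec_solve; infer_instance

-- ===== CLAIM (what is proved, stated in full; the proofs are below) =====
def Claim_equal_solve : Prop := ∀ (A : List (List Int)), Dom_solve A → Pre_solve A → Spec_solve A (solve A)

-- ===== LEMMAS AND PROOFS =====

-- the two bisearch recursions are the same search
theorem bisearchGo_eq (f g : Int → Bool) (h : ∀ m, f m = g m) :
    ∀ (fuel : Nat) (ok ng : Int), bisearchGoA fuel ok ng f = bisearchGoB fuel ok ng g := by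
  intro fuel
  induction fuel with
  | zero => intro ok ng; rfl
  | succ n ih =>
    intro ok ng
    simp only [bisearchGoA, bisearchGoB]
    by_cases hc : ok + 1 < ng
    · have hc' : ¬ ok + 1 ≥ ng := by omega
      simp only [if_pos hc, if_neg hc', h]
      split <;> exact ih _ _
    · have hc' : ok + 1 ≥ ng := by omega
      simp only [if_neg hc, if_pos hc']

theorem bisearch_eq (f g : Int → Bool) (h : ∀ m, f m = g m) :
    ∀ ok ng : Int, bisearchMaxA ok ng f = bisearchMaxB ok ng g := by
  intro ok ng
  unfold bisearchMaxA bisearchMaxB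
  exact bisearchGo_eq f g h _ ok ng

-- the two row-mask loops agree on rows long enough
theorem rowMask_eq (row : List Int) (M : Nat) (m : Int) (hlen : M ≤ row.length) :
    rowMaskB row M m = rowMaskA row M m := by
  unfold rowMaskB rowMaskA
  rw [PySem.List.enumerate_eq_map_pyRange (row.take M) 0, List.foldl_map]
  have hlen' : PySem.List.len (row.take M) = (M : Int) := by
    simp [PySem.List.len_eq, List.length_take, Nat.min_eq_left hlen]
  rw [hlen']
  apply PySem.List.foldl_congr_mem
  intro acc j hj
  have hj' : 0 ≤ j ∧ j < (M : Int) := PySem.List.mem_pyRange_one.mp hj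
  have hget : PySem.List.pyGetD (row.take M) j 0 = PySem.List.pyGetD row j 0 := by
    rw [PySem.List.pyGetD_of_nonneg _ _ hj'.1, PySem.List.pyGetD_of_nonneg _ _ hj'.1]
    have hjn : j.toNat < M := by omega
    simp only [List.getD_eq_getElem?_getD]
    rw [List.getElem?_take_of_lt hjn]
  rw [hget]

-- row masks only use bits below M
theorem maskFold_lt (row : List Int) (M : Nat) (m : Int) :
    ∀ (l : List Int), (∀ j ∈ l, 0 ≤ j ∧ j < (M : Int)) → ∀ acc, acc < 2 ^ M →
      l.foldl (fun rm j => if PySem.List.pyGetD row j 0 ≥ m then rm ||| (1 <<< j.toNat) else rm)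
        acc < 2 ^ M := by
  intro l
  induction l with
  | nil => intro _ acc hacc; simpa using hacc
  | cons j t ih =>
    intro hmem acc hacc
    simp only [List.foldl_cons]
    apply ih (fun x hx => hmem x (List.mem_cons_of_mem _ hx))
    split
    · have hj := hmem j (List.mem_cons_self)
      have hjn : j.toNat < M := by omega
      have h1 : (1 <<< j.toNat) < 2 ^ M := by
        rw [Nat.one_shiftLeft]
        exact Nat.pow_lt_pow_right (by omega) hjn
      exact Nat.or_lt_two_pow hacc h1
    · exact hacc

theorem rowMaskA_lt (row : List Int) (M : Nat) (m : Int) : rowMaskA row M m < 1 <<< M := by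
  unfold rowMaskA
  rw [Nat.one_shiftLeft]
  apply maskFold_lt
  · intro j hj; exact PySem.List.mem_pyRange_one.mp hj
  · exact Nat.two_pow_pos M

-- the set-and-dict loop of solve is the set loop of check paired with the dict loop of B
theorem buildSD_fst (A : List (List Int)) (M : Nat) (m : Int) :
    (buildSD_A A M m).1 = buildS_A A M m := by
  unfold buildSD_A buildS_A
  rw [PySem.List.foldl_prod_mk
    (f := fun S i => PySem.Set.add S (rowMaskA (PySem.List.pyGetD A i []) M m))
    (g := fun d i => PySem.Dict.insert d (rowMaskA (PySem.List.pyGetD A i []) M m) (i + 1))]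

theorem masksB_eq (A : List (List Int)) (M : Nat) (m : Int)
    (hpre : ∀ row ∈ A, M ≤ row.length) :
    masksB A M m = (buildSD_A A M m).2 := by
  unfold masksB buildSD_A
  rw [PySem.List.foldl_prod_mk
    (f := fun S i => PySem.Set.add S (rowMaskA (PySem.List.pyGetD A i []) M m))
    (g := fun d i => PySem.Dict.insert d (rowMaskA (PySem.List.pyGetD A i []) M m) (i + 1))]
  rw [PySem.List.enumerate_eq_map_pyRange A [], List.foldl_map, PySem.List.len_eq]
  apply PySem.List.foldl_congr_mem
  intro acc i hi
  have hi' : 0 ≤ i ∧ i < (A.length : Int) := PySem.List.mem_pyRange_one.mp hi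
  have hrow : PySem.List.pyGetD A i [] ∈ A := by
    rw [PySem.List.pyGetD_of_nonneg _ _ hi'.1]
    have hlt : i.toNat < A.length := by omega
    rw [List.getD_eq_getElem _ _ hlt]
    exact List.getElem_mem hlt
  rw [rowMask_eq _ _ _ (hpre _ hrow)]

-- inserting into a dict appends exactly the keys a set-add would append
theorem keys_fold {ι : Type} (l : List ι) (f : ι → Nat) (g : ι → Int) :
    ∀ (S : PySem.Set Nat) (D : PySem.Dict Nat Int), D.keys = S →
      (l.foldl (fun d i => d.insert (f i) (g i)) D).keys =
        l.foldl (fun s i => PySem.Set.add s (f i)) S := by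
  induction l with
  | nil => intro S D h; simpa using h
  | cons i t ih =>
    intro S D h
    simp only [List.foldl_cons]
    apply ih
    by_cases hc : D.contains (f i) = true
    · rw [PySem.Dict.keys_insert_of_contains _ _ hc, h,
        PySem.Set.add_of_mem (h ▸ (PySem.Dict.contains_iff_mem_keys _ _).mp hc)]
    · have hnc : D.contains (f i) = false := by simpa using hc
      have hnm : f i ∉ S := fun hm =>
        hc ((PySem.Dict.contains_iff_mem_keys _ _).mpr (h ▸ hm))
      rw [PySem.Dict.keys_insert_of_not_contains _ _ hnc, h, PySem.Set.add_of_not_mem hnm]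

-- B's dict keys are exactly A's set, in the same (first-insertion) order
theorem keys_buildSD (A : List (List Int)) (M : Nat) (m : Int) :
    (buildSD_A A M m).2.keys = buildS_A A M m := by
  unfold buildSD_A buildS_A
  rw [PySem.List.foldl_prod_mk
    (f := fun S i => PySem.Set.add S (rowMaskA (PySem.List.pyGetD A i []) M m))
    (g := fun d i => PySem.Dict.insert d (rowMaskA (PySem.List.pyGetD A i []) M m) (i + 1))]
  exact keys_fold _ _ _ _ _ (by simp [PySem.Dict.keys_empty, PySem.Set.empty])

theorem buildS_eq_ofList (A : List (List Int)) (M : Nat) (m : Int) :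
    buildS_A A M m = PySem.Set.ofList
      ((PySem.List.pyRange 0 (A.length : Int) 1).map
        (fun i => rowMaskA (PySem.List.pyGetD A i []) M m)) := by
  unfold buildS_A
  rw [← PySem.Set.update_map_eq_foldl_add, PySem.Set.update_empty]

theorem buildS_nodup (A : List (List Int)) (M : Nat) (m : Int) : (buildS_A A M m).Nodup := by
  rw [buildS_eq_ofList]; exact PySem.Set.nodup_ofList _

theorem buildS_lt (A : List (List Int)) (M : Nat) (m : Int) :
    ∀ x ∈ buildS_A A M m, x < 1 <<< M := by
  intro x hx
  rw [buildS_eq_ofList] at hx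
  rw [PySem.Set.mem_ofList] at hx
  obtain ⟨i, _, rfl⟩ := List.mem_map.mp hx
  exact rowMaskA_lt _ _ _

-- sorting a set of masks below n lists exactly the members of S in range order
theorem sorted_set_eq_filter_range (S : PySem.Set Nat) (n : Nat) (hnd : S.Nodup)
    (hlt : ∀ x ∈ S, x < n) :
    PySem.List.sorted S (fun x => x) false = (List.range n).filter (fun b => decide (b ∈ S)) := by
  apply PySem.List.sorted_eq_of_perm_of_pairwise_lt
  · apply (List.perm_ext_iff_of_nodup (List.Nodup.filter _ List.nodup_range) hnd).mpr
    intro a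
    simp only [List.mem_filter, List.mem_range, decide_eq_true_eq]
    exact ⟨fun h => h.2, fun h => ⟨hlt a h, h⟩⟩
  · exact List.Pairwise.filter _ List.pairwise_lt_range

-- A's guarded scan over all masks = B's scan over the members only
theorem scan_eq_go (S : PySem.Set Nat) (full n : Nat) :
    ∀ k, k ≤ n →
      pairScanA S n full (List.range' k (n - k)) =
        firstPairGo full ((List.range' k (n - k)).filter (fun b => decide (b ∈ S))) := by
  have hff : ∀ (xs : List Nat) (p q : Nat → Bool),
      xs.find? (fun a => p a && q a) = (xs.filter p).find? q := by
    intro xs p q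
    rw [List.find?_filter]
    congr 1
    funext a
    cases hp : p a <;> cases hq : q a <;> simp
  intro k hk
  generalize hd : n - k = d
  induction d generalizing k with
  | zero =>
    simp [List.range'_zero, pairScanA, firstPairGo]
  | succ d ih =>
    have hcons : List.range' k (d + 1) = k :: List.range' (k + 1) d := rfl
    rw [hcons]
    by_cases hkS : k ∈ S
    · have hfilt : (k :: List.range' (k + 1) d).filter (fun b => decide (b ∈ S)) =
          k :: (List.range' (k + 1) d).filter (fun b => decide (b ∈ S)) := by
        simp [hkS]
      rw [hfilt]
      simp only [pairScanA, if_pos hkS, firstPairGo]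
      have hrw : List.range' k (n - k) = k :: List.range' (k + 1) d := by rw [hd]; exact hcons
      rw [hrw, hff (k :: List.range' (k + 1) d) (fun b => decide (b ∈ S))
        (fun b2 => (k ||| b2) == full), hfilt]
      cases hfind : (k :: (List.range' (k + 1) d).filter (fun b => decide (b ∈ S))).find?
          (fun b2 => (k ||| b2) == full) with
      | some b2 => rfl
      | none => exact ih (k + 1) (by omega) (by omega)
    · have hfilt : (k :: List.range' (k + 1) d).filter (fun b => decide (b ∈ S)) =
          (List.range' (k + 1) d).filter (fun b => decide (b ∈ S)) := by
        simp [hkS]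
      rw [hfilt]
      simp only [pairScanA, if_neg hkS]
      exact ih (k + 1) (by omega) (by omega)

-- an early-return-True double loop is "the scan finds a pair"
theorem any_eq_isSome_scan (S : PySem.Set Nat) (n full : Nat) :
    ∀ bits : List Nat,
      (bits.any (fun b1 => decide (b1 ∈ S) &&
        (List.range' b1 (n - b1)).any (fun b2 => decide (b2 ∈ S) && ((b1 ||| b2) == full))))
      = (pairScanA S n full bits).isSome := by
  intro bits
  induction bits with
  | nil => simp [pairScanA]
  | cons b1 rest ih =>
    simp only [List.any_cons, pairScanA]
    by_cases hb : b1 ∈ S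
    · simp only [if_pos hb, decide_eq_true hb, Bool.true_and]
      have hinner : (List.range' b1 (n - b1)).any
          (fun b2 => decide (b2 ∈ S) && ((b1 ||| b2) == full))
          = ((List.range' b1 (n - b1)).find?
              (fun b2 => decide (b2 ∈ S) && ((b1 ||| b2) == full))).isSome :=
        List.isSome_find?.symm
      cases hfind : (List.range' b1 (n - b1)).find?
          (fun b2 => decide (b2 ∈ S) && ((b1 ||| b2) == full)) with
      | some b2 => rw [hfind] at hinner; simp [hinner]
      | none => rw [hfind] at hinner; simp [hinner, ih]
    · simp only [if_neg hb, decide_eq_false hb, Bool.false_and, Bool.false_or]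
      exact ih

-- A's boolean check is "the scan finds a pair"
theorem checkA_eq_isSome (A : List (List Int)) (M : Nat) (m : Int) :
    checkA A M m = (pairScanA (buildS_A A M m) (1 <<< M) ((1 <<< M) - 1)
      (List.range (1 <<< M))).isSome := by
  unfold checkA
  exact any_eq_isSome_scan (buildS_A A M m) (1 <<< M) ((1 <<< M) - 1) (List.range (1 <<< M))

-- B's first-pair search equals A's scan (on Pre_)
theorem firstPair_eq_scan (A : List (List Int)) (m : Int)
    (hpre : ∀ row ∈ A, A.headI.length ≤ row.length) :
    firstPairB (masksB A A.headI.length m) ((1 <<< A.headI.length) - 1) =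
      pairScanA (buildS_A A A.headI.length m) (1 <<< A.headI.length)
        ((1 <<< A.headI.length) - 1) (List.range (1 <<< A.headI.length)) := by
  unfold firstPairB
  rw [masksB_eq A _ m hpre, keys_buildSD,
    sorted_set_eq_filter_range _ (1 <<< A.headI.length) (buildS_nodup A _ m) (buildS_lt A _ m)]
  have h := scan_eq_go (buildS_A A A.headI.length m) ((1 <<< A.headI.length) - 1)
    (1 <<< A.headI.length) 0 (Nat.zero_le _)
  rw [Nat.sub_zero, ← List.range_eq_range'] at h
  exact h.symm

-- ===== VERDICT (by name: the statement is the Claim_ definition above) =====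
theorem solve_spec : Claim_equal_solve := by
  unfold Claim_equal_solve
  intro A _ hpre
  unfold Spec_solve solve solve_alt
  by_cases hA : A.length = 0
  · rw [if_pos hA, if_pos hA]
  · rw [if_neg hA, if_neg hA]
    have hcheckfun : ∀ m : Int, checkFactoryA A m
        = (firstPairB (masksB A A.headI.length m) ((1 <<< A.headI.length) - 1)).isSome := by
      intro m
      unfold checkFactoryA
      rw [if_neg hA]
      rw [checkA_eq_isSome, firstPair_eq_scan A m hpre]
    have hres : bisearchMaxA 0 (10 ^ 9 + 1) (checkFactoryA A)
        = bisearchMaxB 0 (10 ^ 9 + 1)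
            (fun m => (firstPairB (masksB A A.headI.length m)
              ((1 <<< A.headI.length) - 1)).isSome) :=
      bisearch_eq _ _ hcheckfun 0 _
    rw [← hres]
    rw [firstPair_eq_scan A _ hpre, masksB_eq A _ _ hpre, buildSD_fst]
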